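-- pv_equiv track=rewrite | github.com/wpgrant/aoc | 2023/12a.py | getCombos
-- ===== SOURCE A (Python) =====
-- def generateCombos(combos):
--   # Find first ? position
--   pos = combos[0].find('?')
--   newCombos = []
--   # Add new combos
--   for combo in combos:
--     newPound = combo[:pos] + "#" + combo[pos+1:]
--     newCombos.append(newPound)
--     newPeriod = combo[:pos] + "." + combo[pos+1:]
--     newCombos.append(newPeriod)
--   return(newCombos)
--
-- def getCombos(part):
--   # We will get a pattern, let's say
--   #   ..#??#..
--   # We will turn this into combos:
--   #   ..####..
--   #   ..#..#..
--   #   ..##.#..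
--   #   ..#.##..
--   combos = []
--   combos.append(part)
--   stillQuestions = True
--   while stillQuestions:
--     stillQuestions = False
--     for combo in combos:
--       if combo.find('?') >= 0:
--         stillQuestions = True
--         break
--     if stillQuestions:
--       combos = generateCombos(combos)
--   return combos
-- ===== SOURCE B (Python) =====
-- def getCombos(part):
--   # Build the combos right-to-left in one pass: each character either fixes
--   # itself onto every suffix-combo, or ('?') branches into '#' and '.'.
--   combos = ['']
--   for ch in reversed(part):
--     if ch == '?':
--       combos = ['#' + rest for rest in combos] + ['.' + rest for rest in combos]
--     else:
--       combos = [ch + rest for rest in combos]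
--   return combos
-- ===== Notes on version B (the rewrite author's own statement) =====
-- stated objective: simpler
-- what changed: Replaced A's breadth-first while-loop that repeatedly rescans and rebuilds the whole combo list (one pass per '?') by a single right-to-left fold over the characters that extends every suffix-combo by one character (branching at '?'), producing the same list in the same order.
import Mathlib
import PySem

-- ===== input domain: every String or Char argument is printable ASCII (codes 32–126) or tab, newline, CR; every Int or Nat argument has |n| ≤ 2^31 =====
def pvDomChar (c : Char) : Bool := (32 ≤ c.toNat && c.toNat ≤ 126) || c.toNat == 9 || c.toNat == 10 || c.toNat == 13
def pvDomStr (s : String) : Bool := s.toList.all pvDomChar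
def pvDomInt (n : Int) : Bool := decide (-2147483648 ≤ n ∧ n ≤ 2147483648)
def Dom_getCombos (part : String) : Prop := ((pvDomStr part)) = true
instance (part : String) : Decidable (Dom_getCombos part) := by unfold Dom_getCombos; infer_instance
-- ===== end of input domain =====

-- B replaces A's breadth-first rescan-and-rebuild while-loop by a single right-to-left
-- pass over the characters (simpler; same output list in the same order).

-- ===== PORT A =====
-- generateCombos, on the List Char level (strings enter via toList and leave via
-- String.ofList; the string primitives are the PySem.Chars definitions).
def generateCombosL (combos : List (List Char)) : List (List Char) :=
  match combos with
  | [] => []  -- unreachable from getCombos: Python raises IndexError on combos[0] here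
  | c0 :: _ =>
    -- pos = combos[0].find('?')
    let pos : Int := PySem.Chars.find c0 ['?']
    combos.foldl (fun newCombos combo =>
      let newPound := PySem.Chars.slice combo none (some pos) ++ ['#'] ++
                      PySem.Chars.slice combo (some (pos + 1)) none
      let newCombos := newCombos ++ [newPound]
      let newPeriod := PySem.Chars.slice combo none (some pos) ++ ['.'] ++
                       PySem.Chars.slice combo (some (pos + 1)) none
      newCombos ++ [newPeriod]) []

-- the while loop; fuel is only a totality guard (part.length + 1 always suffices,
-- since each iteration replaces one '?' in every combo)
def getCombosLoop (fuel : Nat) (combos : List (List Char)) : List (List Char) :=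
  match fuel with
  | 0 => combos
  | f + 1 =>
    -- for combo in combos: if combo.find('?') >= 0: stillQuestions = True; break
    let stillQuestions := combos.any (fun combo => decide (0 ≤ PySem.Chars.find combo ['?']))
    if stillQuestions then getCombosLoop f (generateCombosL combos) else combos

def getCombos (part : String) : List String :=
  (getCombosLoop (part.toList.length + 1) [part.toList]).map String.ofList

-- ===== PORT B =====
def getCombos_alt (part : String) : List String :=
  (part.toList.reverse.foldl (fun combos ch =>
      if ch = '?' then combos.map ('#' :: ·) ++ combos.map ('.' :: ·)
      else combos.map (ch :: ·)) [[]]).map String.ofList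

-- ===== PRECONDITION & SPEC =====
def Spec_getCombos (part : String) (out : List String) : Prop := out = getCombos_alt part
instance (part : String) (out : List String) : Decidable (Spec_getCombos part out) := by unfold Spec_getCombos; infer_instance

-- ===== CLAIM (what is proved, stated in full; the proofs are below) =====
def Claim_equal_getCombos : Prop := ∀ (part : String), Dom_getCombos part → Spec_getCombos part (getCombos part)

-- ===== LEMMAS AND PROOFS =====

-- the recursion B's fold computes (foldr form); used only in the proofs
def expand : List Char → List (List Char)
  | [] => [[]]
  | c :: cs =>
    if c = '?' then (expand cs).map ('#' :: ·) ++ (expand cs).map ('.' :: ·)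
    else (expand cs).map (c :: ·)

lemma alt_eq_expand (part : String) :
    getCombos_alt part = (expand part.toList).map String.ofList := by
  unfold getCombos_alt
  rw [List.foldl_reverse]
  congr 1
  induction part.toList with
  | nil => rfl
  | cons c cs ih => simp [expand, List.foldr_cons, ih]

lemma expand_no_q {c : List Char} (h : '?' ∉ c) : expand c = [c] := by
  induction c with
  | nil => rfl
  | cons a cs ih =>
    simp only [List.mem_cons, not_or] at h
    simp [expand, Ne.symm h.1, ih h.2]

lemma expand_split (pre post : List Char) (h : '?' ∉ pre) :
    expand (pre ++ '?' :: post) =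
      expand (pre ++ '#' :: post) ++ expand (pre ++ '.' :: post) := by
  induction pre with
  | nil => simp [expand]
  | cons a pre ih =>
    simp only [List.mem_cons, not_or] at h
    simp [expand, Ne.symm h.1, ih h.2, List.map_append]

-- the '?'-mask of a combo; A's loop keeps it equal across all combos
def maskQ (c : List Char) : List Bool := c.map (· == '?')

lemma q_mem_iff (l : List Char) : true ∈ maskQ l ↔ '?' ∈ l := by
  simp [maskQ, List.mem_map]

-- first '?' of c: find returns its index p, nothing before it is '?'
lemma findQ (c : List Char) (h : '?' ∈ c) :
    ∃ p : Nat, PySem.Chars.find c ['?'] = (p : Int) ∧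
      '?' ∉ c.take p ∧ c.drop p = '?' :: c.drop (p + 1) := by
  have hinf : ['?'] <:+: c := (List.singleton_infix_iff _ _).mpr h
  have h0 : 0 ≤ PySem.Chars.find c ['?'] := (PySem.Chars.find_nonneg_iff _ _).mpr hinf
  obtain ⟨hpre, hmin⟩ := PySem.Chars.find_spec (s := c) (sub := ['?']) h0
  refine ⟨(PySem.Chars.find c ['?']).toNat, (Int.toNat_of_nonneg h0).symm, ?_, ?_⟩
  · intro hmem
    obtain ⟨pre, post, hsplit⟩ := List.append_of_mem hmem
    have hlen : pre.length < (PySem.Chars.find c ['?']).toNat := by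
      have h1 : (c.take (PySem.Chars.find c ['?']).toNat).length ≤
          (PySem.Chars.find c ['?']).toNat := List.length_take_le _ _
      have h2 : (c.take (PySem.Chars.find c ['?']).toNat).length =
          pre.length + 1 + post.length := by
        rw [hsplit]; simp; omega
      omega
    have hcsplit : c = pre ++ '?' :: (post ++ c.drop (PySem.Chars.find c ['?']).toNat) := by
      conv_lhs => rw [← List.take_append_drop (PySem.Chars.find c ['?']).toNat c]
      rw [hsplit]; simp
    refine hmin pre.length hlen ⟨post ++ c.drop (PySem.Chars.find c ['?']).toNat, ?_⟩
    rw [List.singleton_append]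
    conv_rhs => rw [hcsplit]
    exact (List.drop_left' rfl).symm
  · obtain ⟨t, ht⟩ := hpre
    rw [List.singleton_append] at ht
    have hd : c.drop (PySem.Chars.find c ['?']).toNat = '?' :: t := ht.symm
    rw [hd]
    congr 1
    have h3 := congrArg List.tail hd
    have h4 : c.drop ((PySem.Chars.find c ['?']).toNat + 1) = t := by
      simpa [List.tail_drop] using h3
    exact h4.symm

-- substituting a non-'?' character at position p flips the mask bit there
lemma maskQ_subst (c : List Char) (p : Nat) (x : Char) (hx : (x == '?') = false) :
    maskQ (c.take p ++ x :: c.drop (p + 1)) =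
      (maskQ c).take p ++ false :: (maskQ c).drop (p + 1) := by
  simp [maskQ, List.map_take, List.map_drop, hx]

-- a combo with the same mask as c0 splits at the same first-'?' position
lemma decomp_of_mask (c c0 : List Char) (p : Nat) (hm : maskQ c = maskQ c0)
    (hpre0 : '?' ∉ c0.take p) (hdrop0 : c0.drop p = '?' :: c0.drop (p + 1)) :
    '?' ∉ c.take p ∧ c.drop p = '?' :: c.drop (p + 1) := by
  have hmt : maskQ (c.take p) = maskQ (c0.take p) := by
    simp only [maskQ, List.map_take]
    exact congrArg (List.take p) hm
  have hmd : maskQ (c.drop p) = maskQ (c0.drop p) := by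
    simp only [maskQ, List.map_drop]
    exact congrArg (List.drop p) hm
  constructor
  · intro hmem
    exact hpre0 ((q_mem_iff _).mp (by rw [← hmt]; exact (q_mem_iff _).mpr hmem))
  · rw [hdrop0] at hmd
    cases hcd : c.drop p with
    | nil => rw [hcd] at hmd; simp [maskQ] at hmd
    | cons x t =>
      rw [hcd] at hmd
      simp only [maskQ, List.map_cons, List.cons.injEq] at hmd
      have hx : x = '?' := by
        have := hmd.1; simpa [beq_iff_eq] using this
      have ht : t = c.drop (p + 1) := by
        have := congrArg List.tail hcd
        simpa [List.tail_drop] using this.symm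
      rw [hx, ht]

lemma c0_split (c0 : List Char) (p : Nat) (hdrop0 : c0.drop p = '?' :: c0.drop (p + 1)) :
    c0 = c0.take p ++ '?' :: c0.drop (p + 1) := by
  conv_lhs => rw [← List.take_append_drop p c0]
  rw [hdrop0]

-- generateCombos on nonempty combos, with the head's first-'?' index p
lemma genCombos_eq (c0 : List Char) (rest : List (List Char)) (p : Nat)
    (hfind : PySem.Chars.find c0 ['?'] = (p : Int)) :
    generateCombosL (c0 :: rest) =
      (c0 :: rest).flatMap (fun c =>
        [c.take p ++ '#' :: c.drop (p + 1), c.take p ++ '.' :: c.drop (p + 1)]) := by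
  have hcast : (p : Int) + 1 = ((p + 1 : Nat) : Int) := by push_cast; ring
  simp only [generateCombosL, hfind, hcast, PySem.Chars.slice_eq_listSlice,
    PySem.List.slice_to_natCast, PySem.List.slice_from_natCast]
  rw [show (fun (newCombos : List (List Char)) (combo : List Char) =>
      newCombos ++ [combo.take p ++ ['#'] ++ combo.drop (p + 1)] ++
        [combo.take p ++ ['.'] ++ combo.drop (p + 1)]) =
      (fun acc combo => acc ++ [combo.take p ++ '#' :: combo.drop (p + 1),
        combo.take p ++ '.' :: combo.drop (p + 1)]) from by
    funext acc combo; simp [List.append_assoc]]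
  rw [PySem.List.foldl_append_eq_flatMap]
  simp

-- the invariant lemma: on combos with a shared mask whose head has k '?'s,
-- A's loop (with enough fuel) produces exactly the expand of every combo, in order
lemma loop_eq (k : Nat) : ∀ (fuel : Nat) (c0 : List Char) (rest : List (List Char)),
    k < fuel →
    (∀ c ∈ c0 :: rest, maskQ c = maskQ c0) →
    c0.count '?' = k →
    getCombosLoop fuel (c0 :: rest) = (c0 :: rest).flatMap expand := by
  induction k with
  | zero =>
    intro fuel c0 rest hf hm hc
    obtain ⟨f, rfl⟩ : ∃ f, fuel = f + 1 := ⟨fuel - 1, by omega⟩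
    have hnoq : ∀ c ∈ c0 :: rest, '?' ∉ c := by
      intro c hcmem hq
      have h1 : true ∈ maskQ c0 := by rw [← hm c hcmem]; exact (q_mem_iff _).mpr hq
      exact (List.count_eq_zero.mp hc) ((q_mem_iff _).mp h1)
    have hany : ((c0 :: rest).any fun combo => decide (0 ≤ PySem.Chars.find combo ['?'])) = false := by
      rw [List.any_eq_false]
      intro c hcmem
      have : PySem.Chars.find c ['?'] = -1 := (PySem.Chars.find_eq_neg_one_iff _ _).mpr
        (fun hinf => hnoq c hcmem ((List.singleton_infix_iff _ _).mp hinf))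
      simp [this]
    rw [getCombosLoop]
    simp only [hany, if_false, Bool.false_eq_true]
    rw [List.flatMap_congr (g := fun c => [c]) (fun c hcmem => expand_no_q (hnoq c hcmem))]
    simp
  | succ k ih =>
    intro fuel c0 rest hf hm hc
    obtain ⟨f, rfl⟩ : ∃ f, fuel = f + 1 := ⟨fuel - 1, by omega⟩
    have hq0 : '?' ∈ c0 := by
      by_contra hq
      rw [List.count_eq_zero.mpr hq] at hc
      omega
    obtain ⟨p, hfind, hpre0, hdrop0⟩ := findQ c0 hq0
    have hany : ((c0 :: rest).any fun combo => decide (0 ≤ PySem.Chars.find combo ['?'])) = true := by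
      simp [List.any_cons, hfind]
    rw [getCombosLoop]
    simp only [hany, if_true]
    rw [genCombos_eq c0 rest p hfind]
    set g := fun c : List Char =>
      [c.take p ++ '#' :: c.drop (p + 1), c.take p ++ '.' :: c.drop (p + 1)] with hg
    have hflat : (c0 :: rest).flatMap g =
        (c0.take p ++ '#' :: c0.drop (p + 1)) ::
          (c0.take p ++ '.' :: c0.drop (p + 1)) :: rest.flatMap g := by
      simp [hg]
    have hsub : ∀ c ∈ c0 :: rest, ∀ x : Char, (x == '?') = false →
        maskQ (c.take p ++ x :: c.drop (p + 1)) =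
          maskQ (c0.take p ++ '#' :: c0.drop (p + 1)) := by
      intro c hcmem x hx
      rw [maskQ_subst c p x hx, maskQ_subst c0 p '#' (by decide), hm c hcmem]
    have hcnt : (c0.take p ++ '#' :: c0.drop (p + 1)).count '?' = k := by
      have h1 : c0.count '?' = k + 1 := hc
      rw [c0_split c0 p hdrop0] at h1
      simp [List.count_append] at h1 ⊢
      omega
    have hinv : ∀ c ∈ (c0.take p ++ '#' :: c0.drop (p + 1)) ::
        (c0.take p ++ '.' :: c0.drop (p + 1)) :: rest.flatMap g,
        maskQ c = maskQ (c0.take p ++ '#' :: c0.drop (p + 1)) := by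
      intro c hcmem
      rcases List.mem_cons.mp hcmem with rfl | hcmem
      · rfl
      rcases List.mem_cons.mp hcmem with rfl | hcmem
      · exact hsub c0 (List.mem_cons_self) '.' (by decide)
      · obtain ⟨d, hd, hcd⟩ := List.mem_flatMap.mp hcmem
        rcases List.mem_cons.mp hcd with rfl | hcd
        · exact hsub d (List.mem_cons_of_mem _ hd) '#' (by decide)
        rcases List.mem_cons.mp hcd with rfl | hcd
        · exact hsub d (List.mem_cons_of_mem _ hd) '.' (by decide)
        · simp at hcd
    rw [hflat, ih f _ _ (by omega) hinv hcnt, ← hflat, List.flatMap_assoc]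
    apply List.flatMap_congr
    intro c hcmem
    obtain ⟨hpre, hdrop⟩ := decomp_of_mask c c0 p (hm c hcmem) hpre0 hdrop0
    have hcsplit := c0_split c p hdrop
    conv_rhs => rw [hcsplit]
    rw [expand_split _ _ hpre]
    simp [hg]

-- ===== VERDICT (by name: the statement is the Claim_ definition above) =====
theorem getCombos_spec : Claim_equal_getCombos := by
  intro part _
  unfold Spec_getCombos getCombos
  rw [alt_eq_expand]
  rw [loop_eq (part.toList.count '?') (part.toList.length + 1) part.toList []
    (by have := List.count_le_length (l := part.toList) (a := '?'); omega)
    (by intro c hcmem; rw [List.mem_singleton.mp hcmem])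
    rfl]
  simp
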